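-- pv_equiv track=rewrite | github.com/NotHotmilk/psolver | solvers/puzzles/TransformMatrix.py | transform_matrix_with_fixed_edges
-- ===== SOURCE A (Python) =====
-- def rotate_90(matrix):
--     return list(zip(*matrix[::-1]))
--
-- def rotate_180(matrix):
--     return rotate_90(rotate_90(matrix))
--
-- def rotate_270(matrix):
--     return rotate_90(rotate_180(matrix))
--
-- def transform_matrix_with_fixed_edges(matrix, l):
--     size = 2 * l + 3
--     new_matrix = [row[:] for row in matrix]
--
--     # Extract submatrices
--     top_left = [row[1:l + 1] for row in matrix[1:l + 1]]
--     top_right = [row[l + 2:2 * l + 2] for row in matrix[1:l + 1]]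
--     bottom_left = [row[1:l + 1] for row in matrix[l + 2:2 * l + 2]]
--     bottom_right = [row[l + 2:2 * l + 2] for row in matrix[l + 2:2 * l + 2]]
--
--     # Rotate submatrices
--     top_right_rotated = rotate_90(top_right)
--     bottom_right_rotated = rotate_180(bottom_right)
--     bottom_left_rotated = rotate_270(bottom_left)
--
--     # Place rotated submatrices back into the new matrix
--     for i in range(l):
--         new_matrix[1 + i][l + 2:2 * l + 2] = top_right_rotated[i]
--         new_matrix[l + 2 + i][l + 2:2 * l + 2] = bottom_right_rotated[i]
--         new_matrix[l + 2 + i][1:l + 1] = bottom_left_rotated[i]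
--
--     return new_matrix
-- ===== SOURCE B (Python) =====
-- def transform_matrix_with_fixed_edges(matrix, l):
--     new_matrix = [row[:] for row in matrix]
--     for i in range(l):
--         for j in range(l):
--             new_matrix[1 + i][l + 2 + j] = matrix[l - j][l + 2 + i]              # top-right: 90 deg
--             new_matrix[l + 2 + i][l + 2 + j] = matrix[2 * l + 1 - i][2 * l + 1 - j]  # bottom-right: 180 deg
--             new_matrix[l + 2 + i][1 + j] = matrix[l + 2 + j][l - i]              # bottom-left: 270 deg
--     return new_matrix
-- ===== Notes on version B (the rewrite author's own statement) =====
-- stated objective: simpler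
-- what changed: Replaces the extract-submatrix / zip-based-rotate / slice-assign pipeline with a copy plus one nested i,j loop that writes each rotated quadrant cell directly through closed-form rotation index maps.
import Mathlib
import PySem

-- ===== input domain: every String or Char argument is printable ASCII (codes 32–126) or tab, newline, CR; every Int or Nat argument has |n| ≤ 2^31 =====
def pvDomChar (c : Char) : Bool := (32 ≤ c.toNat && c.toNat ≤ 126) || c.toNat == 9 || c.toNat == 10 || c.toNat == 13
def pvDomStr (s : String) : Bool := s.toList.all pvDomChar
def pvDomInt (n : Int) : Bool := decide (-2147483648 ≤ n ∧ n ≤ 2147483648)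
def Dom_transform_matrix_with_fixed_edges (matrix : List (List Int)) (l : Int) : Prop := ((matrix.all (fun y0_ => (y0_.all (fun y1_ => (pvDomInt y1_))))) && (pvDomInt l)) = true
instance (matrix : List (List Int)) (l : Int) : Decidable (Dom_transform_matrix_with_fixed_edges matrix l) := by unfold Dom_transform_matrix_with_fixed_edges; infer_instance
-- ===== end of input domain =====

-- B replaces A's extract/zip-rotate/slice-assign pipeline by one nested index loop writing each
-- output cell directly via closed-form rotation index maps (objective: simpler; same cost).


-- ===== PORT A =====
-- zip(*rows): tuples of length = min row length (empty when rows = []); exact Python zip semantics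
def pvZipStar (rows : List (List Int)) : List (List Int) :=
  match rows with
  | [] => []
  | r0 :: rs =>
      let m := (rs.map List.length).foldl min r0.length
      (List.range m).map (fun i => rows.map (fun r => r.getD i 0))

def pvRot90 (m : List (List Int)) : List (List Int) := pvZipStar m.reverse
def pvRot180 (m : List (List Int)) : List (List Int) := pvRot90 (pvRot90 m)
def pvRot270 (m : List (List Int)) : List (List Int) := pvRot90 (pvRot180 m)

-- Python `nm[r][a:b] = v`; exact for 0 ≤ r < len nm (Pre_ keeps every r used by the loop in range)
def pvSetRowSlice (nm : List (List Int)) (r a b : Int) (v : List Int) : List (List Int) :=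
  let row := nm.getD r.toNat []
  nm.set r.toNat (PySem.List.slice row none (some a) ++ v ++ PySem.List.slice row (some b) none)

-- loop body of A's `for i in range(l)` (trr/brr/blr are the three rotated quadrants);
-- `new_matrix[…][i]` indexing is exact for in-range i, which Pre_ guarantees
def pvStep (trr brr blr : List (List Int)) (l : Int) (nm : List (List Int)) (i : Int) : List (List Int) :=
  let nm1 := pvSetRowSlice nm (1 + i) (l + 2) (2 * l + 2) (PySem.List.pyGetD trr i [])
  let nm2 := pvSetRowSlice nm1 (l + 2 + i) (l + 2) (2 * l + 2) (PySem.List.pyGetD brr i [])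
  pvSetRowSlice nm2 (l + 2 + i) 1 (l + 1) (PySem.List.pyGetD blr i [])

def transform_matrix_with_fixed_edges (matrix : List (List Int)) (l : Int) : List (List Int) :=
  let _size := 2 * l + 3
  let new_matrix := matrix.map (fun row => PySem.List.slice row none none)   -- [row[:] for row in matrix]
  let _top_left := (PySem.List.slice matrix (some 1) (some (l + 1))).map
      (fun row => PySem.List.slice row (some 1) (some (l + 1)))              -- extracted but unused, as in A
  let top_right := (PySem.List.slice matrix (some 1) (some (l + 1))).map
      (fun row => PySem.List.slice row (some (l + 2)) (some (2 * l + 2)))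
  let bottom_left := (PySem.List.slice matrix (some (l + 2)) (some (2 * l + 2))).map
      (fun row => PySem.List.slice row (some 1) (some (l + 1)))
  let bottom_right := (PySem.List.slice matrix (some (l + 2)) (some (2 * l + 2))).map
      (fun row => PySem.List.slice row (some (l + 2)) (some (2 * l + 2)))
  let top_right_rotated := pvRot90 top_right
  let bottom_right_rotated := pvRot180 bottom_right
  let bottom_left_rotated := pvRot270 bottom_left
  (PySem.List.pyRange 0 l 1).foldl (pvStep top_right_rotated bottom_right_rotated bottom_left_rotated l) new_matrix

-- ===== PORT B =====
-- matrix[r][c]; exact for in-range nonnegative r, c, which Pre_ guarantees at every use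
def pvGet2 (matrix : List (List Int)) (r c : Int) : Int :=
  PySem.List.pyGetD (PySem.List.pyGetD matrix r []) c 0

-- Python `nm[r][c] = v`; exact for in-range nonnegative r, c, which Pre_ guarantees at every use
def pvSetCell (nm : List (List Int)) (r c : Int) (v : Int) : List (List Int) :=
  nm.set r.toNat ((nm.getD r.toNat []).set c.toNat v)

-- body of B's inner `for j in range(l)`: the three direct rotated-cell writes
def pvCellStep (matrix : List (List Int)) (l i : Int) (nm : List (List Int)) (j : Int) : List (List Int) :=
  let nm1 := pvSetCell nm (1 + i) (l + 2 + j) (pvGet2 matrix (l - j) (l + 2 + i))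
  let nm2 := pvSetCell nm1 (l + 2 + i) (l + 2 + j) (pvGet2 matrix (2 * l + 1 - i) (2 * l + 1 - j))
  pvSetCell nm2 (l + 2 + i) (1 + j) (pvGet2 matrix (l + 2 + j) (l - i))

-- B's inner `for j in range(l)` loop
def pvQuadStep (matrix : List (List Int)) (l : Int) (nm : List (List Int)) (i : Int) : List (List Int) :=
  (PySem.List.pyRange 0 l 1).foldl (pvCellStep matrix l i) nm

def transform_matrix_with_fixed_edges_alt (matrix : List (List Int)) (l : Int) : List (List Int) :=
  let new_matrix := matrix.map (fun row => PySem.List.slice row none none)   -- [row[:] for row in matrix]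
  (PySem.List.pyRange 0 l 1).foldl (pvQuadStep matrix l) new_matrix

-- ===== PRECONDITION & SPEC =====
-- Pre_ admits every l < 1 (the loops never run: both programs return a row-wise copy of any
-- matrix) and, for l ≥ 1, exactly the (2l+3)×(2l+3) matrices — the function's stated domain.
-- Other shapes with l ≥ 1 are excluded: there A's slice reads and writes silently clamp,
-- returning a matrix of accidental shape, while B's direct indexing raises IndexError.
def Pre_transform_matrix_with_fixed_edges (matrix : List (List Int)) (l : Int) : Prop :=
  l < 1 ∨ (0 ≤ l ∧ matrix.length = (2 * l + 3).toNat ∧ ∀ row ∈ matrix, row.length = (2 * l + 3).toNat)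
instance (matrix : List (List Int)) (l : Int) : Decidable (Pre_transform_matrix_with_fixed_edges matrix l) := by
  unfold Pre_transform_matrix_with_fixed_edges; infer_instance

def pvWitness_transform_matrix_with_fixed_edges : List (List Int) × Int :=
  ([[1, 2, 3], [4, 5, 6], [7, 8, 9]], 0)

def Spec_transform_matrix_with_fixed_edges (matrix : List (List Int)) (l : Int) (out : List (List Int)) : Prop := out = transform_matrix_with_fixed_edges_alt matrix l
instance (matrix : List (List Int)) (l : Int) (out : List (List Int)) : Decidable (Spec_transform_matrix_with_fixed_edges matrix l out) := by unfold Spec_transform_matrix_with_fixed_edges; infer_instance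

-- ===== CLAIM (what is proved, stated in full; the proofs are below) =====
def Claim_equal_transform_matrix_with_fixed_edges : Prop := ∀ (matrix : List (List Int)) (l : Int), Dom_transform_matrix_with_fixed_edges matrix l → Pre_transform_matrix_with_fixed_edges matrix l → Spec_transform_matrix_with_fixed_edges matrix l (transform_matrix_with_fixed_edges matrix l)

-- ===== LEMMAS AND PROOFS =====


-- entry (i,j) of a matrix, with defaults (only read in range)
def pvEntry (Q : List (List Int)) (i j : Nat) : Int := (Q.getD i []).getD j 0

-- "Q is a k × k matrix"
def pvSq (k : Nat) (Q : List (List Int)) : Prop := Q.length = k ∧ ∀ row ∈ Q, row.length = k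

-- final shape of a top-region row (row 1+i) after A's loop
def pvTopRow (trr : List (List Int)) (l : Int) (i : Nat) (row : List Int) : List Int :=
  PySem.List.slice row none (some (l + 2)) ++ PySem.List.pyGetD trr (i : Int) [] ++
    PySem.List.slice row (some (2 * l + 2)) none

-- final shape of a bottom-region row (row l+2+i) after A's loop (two slice assignments)
def pvBotRow (brr blr : List (List Int)) (l : Int) (i : Nat) (row : List Int) : List Int :=
  let row1 := PySem.List.slice row none (some (l + 2)) ++ PySem.List.pyGetD brr (i : Int) [] ++
    PySem.List.slice row (some (2 * l + 2)) none
  PySem.List.slice row1 none (some 1) ++ PySem.List.pyGetD blr (i : Int) [] ++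
    PySem.List.slice row1 (some (l + 1)) none

lemma pv_foldl_min_const (L : List Nat) (k : Nat) (h : ∀ x ∈ L, x = k) : L.foldl min k = k := by
  induction L with
  | nil => rfl
  | cons a t ih =>
      have ha : a = k := h a (by simp)
      simp [List.foldl, ha]
      exact ih (fun x hx => h x (by simp [hx]))

lemma pv_zipstar_spec (k : Nat) (Q : List (List Int)) (h : pvSq k Q) :
    pvZipStar Q = (List.range k).map (fun i => Q.map (fun r => r.getD i 0)) := by
  obtain ⟨hlen, hrow⟩ := h
  match Q, hlen with
  | [], hlen => simp at hlen; subst hlen; rfl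
  | r0 :: rs, hlen =>
      show (List.range ((rs.map List.length).foldl min r0.length)).map _ = _
      have h0 : r0.length = k := hrow r0 (by simp)
      have hmin : (rs.map List.length).foldl min r0.length = k := by
        rw [h0]
        exact pv_foldl_min_const _ _ (by
          intro x hx
          simp only [List.mem_map] at hx
          obtain ⟨row, hr, hxx⟩ := hx
          rw [← hxx]; exact hrow row (by simp [hr]))
      rw [hmin]

lemma pv_rot90_sq (k : Nat) (Q : List (List Int)) (h : pvSq k Q) : pvSq k (pvRot90 Q) := by
  have hrev : pvSq k Q.reverse := by
    obtain ⟨h1, h2⟩ := h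
    exact ⟨by simp [h1], fun row hr => h2 row (by simpa using hr)⟩
  unfold pvRot90
  rw [pv_zipstar_spec k _ hrev]
  constructor
  · simp
  · intro row hr
    simp only [List.mem_map] at hr
    obtain ⟨i, _, hi⟩ := hr
    rw [← hi]
    simp [h.1]

lemma pv_rot90_entry (k : Nat) (Q : List (List Int)) (h : pvSq k Q) (i j : Nat)
    (hi : i < k) (hj : j < k) : pvEntry (pvRot90 Q) i j = pvEntry Q (k - 1 - j) i := by
  have hrev : pvSq k Q.reverse := by
    obtain ⟨h1, h2⟩ := h
    exact ⟨by simp [h1], fun row hr => h2 row (by simpa using hr)⟩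
  unfold pvRot90
  rw [pv_zipstar_spec k _ hrev]
  unfold pvEntry
  have h1 : ((List.range k).map (fun i => Q.reverse.map (fun r => r.getD i 0))).getD i [] =
      Q.reverse.map (fun r => r.getD i 0) := by
    rw [List.getD_eq_getElem _ _ (by simp [hi])]
    simp
  rw [h1]
  have hjlen : j < Q.reverse.length := by simp [h.1, hj]
  rw [List.getD_eq_getElem _ _ (by simpa using hjlen)]
  simp only [List.getElem_map]
  rw [List.getElem_reverse]
  rw [List.getD_eq_getElem Q [] (show k - 1 - j < Q.length by rw [h.1]; omega)]
  have he : Q.length - 1 - j = k - 1 - j := by rw [h.1]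
  simp only [he]

lemma pv_rot180_entry (k : Nat) (Q : List (List Int)) (h : pvSq k Q) (i j : Nat)
    (hi : i < k) (hj : j < k) : pvEntry (pvRot180 Q) i j = pvEntry Q (k - 1 - i) (k - 1 - j) := by
  unfold pvRot180
  rw [pv_rot90_entry k _ (pv_rot90_sq k Q h) i j hi hj,
      pv_rot90_entry k Q h (k - 1 - j) i (by omega) hi]

lemma pv_rot270_entry (k : Nat) (Q : List (List Int)) (h : pvSq k Q) (i j : Nat)
    (hi : i < k) (hj : j < k) : pvEntry (pvRot270 Q) i j = pvEntry Q j (k - 1 - i) := by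
  unfold pvRot270 pvRot180
  rw [pv_rot90_entry k _ (pv_rot90_sq k _ (pv_rot90_sq k Q h)) i j hi hj,
      pv_rot90_entry k _ (pv_rot90_sq k Q h) (k - 1 - j) i (by omega) hi,
      pv_rot90_entry k Q h (k - 1 - i) (k - 1 - j) (by omega) (by omega)]
  congr 1
  omega

lemma pv_quad_spec (k a b : Nat) (A1 A2 B1 B2 : Int) (matrix : List (List Int))
    (hm : matrix.length = 2 * k + 3) (hrow : ∀ row ∈ matrix, row.length = 2 * k + 3)
    (hA1 : A1 = (a : Int)) (hA2 : A2 = (a : Int) + (k : Int))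
    (hB1 : B1 = (b : Int)) (hB2 : B2 = (b : Int) + (k : Int))
    (ha : a + k ≤ 2 * k + 3) (hb : b + k ≤ 2 * k + 3) :
    pvSq k ((PySem.List.slice matrix (some A1) (some A2)).map
        (fun row => PySem.List.slice row (some B1) (some B2))) ∧
      ∀ i j : Nat, i < k → j < k →
        pvEntry ((PySem.List.slice matrix (some A1) (some A2)).map
          (fun row => PySem.List.slice row (some B1) (some B2))) i j = pvEntry matrix (a + i) (b + j) := by
  subst hA1 hA2 hB1 hB2
  rw [PySem.List.slice_natCast_add]
  simp only [PySem.List.slice_natCast_add]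
  have hlen : (((matrix.drop a).take k).map (fun row => (row.drop b).take k)).length = k := by
    simp; omega
  have hrows : ∀ row ∈ ((matrix.drop a).take k).map (fun row => (row.drop b).take k),
      row.length = k := by
    intro row hr
    simp only [List.mem_map] at hr
    obtain ⟨row', hr', hrr⟩ := hr
    have : row' ∈ matrix := List.mem_of_mem_drop (List.mem_of_mem_take hr')
    have := hrow row' this
    rw [← hrr]
    simp [this]; omega
  refine ⟨⟨hlen, hrows⟩, ?_⟩
  intro i j hi hj
  unfold pvEntry
  have e1 : (((matrix.drop a).take k).map (fun row => (row.drop b).take k)).getD i [] =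
      ((matrix[a + i]'(by omega)).drop b).take k := by
    rw [List.getD_eq_getElem _ _ (by rw [hlen]; exact hi)]
    simp only [List.getElem_map, List.getElem_take, List.getElem_drop]
  have e2 : matrix.getD (a + i) [] = matrix[a + i]'(by omega) :=
    List.getD_eq_getElem matrix [] (by omega)
  rw [e1, e2]
  have hrowlen : (matrix[a + i]'(by omega)).length = 2 * k + 3 := hrow _ (by simp)
  rw [List.getD_eq_getElem _ _ (by simp [hrowlen]; omega)]
  simp only [List.getElem_take, List.getElem_drop]
  rw [List.getD_eq_getElem _ _ (by rw [hrowlen]; omega)]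

lemma pv_getD_set {α : Type} (L : List α) (m : Nat) (x d : α) (r : Nat) :
    (L.set m x).getD r d = if m = r ∧ m < L.length then x else L.getD r d := by
  simp [List.getD, List.getElem?_set]
  by_cases hmr : m = r
  · subst hmr
    by_cases hm : m < L.length <;> simp [hm]
  · simp [hmr]

lemma pv_set_len (nm : List (List Int)) (r a b : Int) (v : List Int) :
    (pvSetRowSlice nm r a b v).length = nm.length := by
  simp [pvSetRowSlice]

lemma pv_set_getD (nm : List (List Int)) (m : Nat) (a b : Int) (v : List Int) (r : Nat)
    (hm : m < nm.length) :
    (pvSetRowSlice nm (m : Int) a b v).getD r [] =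
      if m = r then
        PySem.List.slice (nm.getD m []) none (some a) ++ v ++
          PySem.List.slice (nm.getD m []) (some b) none
      else nm.getD r [] := by
  show (nm.set ((m : Int)).toNat _).getD r [] = _
  rw [Int.toNat_natCast, pv_getD_set]
  by_cases h : m = r
  · subst h; rw [if_pos ⟨rfl, hm⟩, if_pos rfl]
  · rw [if_neg (by tauto), if_neg h]

lemma pv_step_get (trr brr blr : List (List Int)) (k : Nat) (nm : List (List Int)) (i : Nat)
    (hlen : nm.length = 2 * k + 3) (hik : i < k) :
    (pvStep trr brr blr (k : Int) nm (i : Int)).length = 2 * k + 3 ∧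
      ∀ r : Nat, r < 2 * k + 3 →
        (pvStep trr brr blr (k : Int) nm (i : Int)).getD r [] =
          if r = 1 + i then pvTopRow trr (k : Int) i (nm.getD r [])
          else if r = k + 2 + i then pvBotRow brr blr (k : Int) i (nm.getD r [])
          else nm.getD r [] := by
  have c1 : (1 : Int) + (i : Int) = ((1 + i : Nat) : Int) := by push_cast; ring
  have c2 : (k : Int) + 2 + (i : Int) = ((k + 2 + i : Nat) : Int) := by push_cast; ring
  have hstep : pvStep trr brr blr (k : Int) nm (i : Int) =
      pvSetRowSlice
        (pvSetRowSlice
          (pvSetRowSlice nm ((1 + i : Nat) : Int) ((k : Int) + 2) (2 * (k : Int) + 2)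
            (PySem.List.pyGetD trr (i : Int) []))
          ((k + 2 + i : Nat) : Int) ((k : Int) + 2) (2 * (k : Int) + 2)
          (PySem.List.pyGetD brr (i : Int) []))
        ((k + 2 + i : Nat) : Int) 1 ((k : Int) + 1) (PySem.List.pyGetD blr (i : Int) []) := by
    unfold pvStep
    rw [c1, c2]
  set X := pvSetRowSlice nm ((1 + i : Nat) : Int) ((k : Int) + 2) (2 * (k : Int) + 2)
    (PySem.List.pyGetD trr (i : Int) []) with hXdef
  set Y := pvSetRowSlice X ((k + 2 + i : Nat) : Int) ((k : Int) + 2) (2 * (k : Int) + 2)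
    (PySem.List.pyGetD brr (i : Int) []) with hYdef
  have hXlen : X.length = 2 * k + 3 := by rw [hXdef, pv_set_len, hlen]
  have hYlen : Y.length = 2 * k + 3 := by rw [hYdef, pv_set_len, hXlen]
  have hX : ∀ r : Nat, X.getD r [] =
      if 1 + i = r then pvTopRow trr (k : Int) i (nm.getD (1 + i) []) else nm.getD r [] := by
    intro r
    rw [hXdef, pv_set_getD nm (1 + i) _ _ _ r (by omega)]
    rfl
  have hY : ∀ r : Nat, Y.getD r [] =
      if k + 2 + i = r then
        PySem.List.slice (nm.getD (k + 2 + i) []) none (some ((k : Int) + 2)) ++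
          PySem.List.pyGetD brr (i : Int) [] ++
          PySem.List.slice (nm.getD (k + 2 + i) []) (some (2 * (k : Int) + 2)) none
      else X.getD r [] := by
    intro r
    rw [hYdef, pv_set_getD X (k + 2 + i) _ _ _ r (by omega)]
    rw [hX (k + 2 + i), if_neg (by omega : ¬ 1 + i = k + 2 + i)]
  constructor
  · rw [hstep, pv_set_len, hYlen]
  · intro r hr
    rw [hstep, pv_set_getD Y (k + 2 + i) _ _ _ r (by omega)]
    rw [hY (k + 2 + i), if_pos rfl, hY r, hX r]
    by_cases h1 : r = 1 + i
    · rw [if_neg (by omega), if_pos h1.symm, if_neg (by omega), if_pos h1]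
      rw [← h1]
    · by_cases h2 : r = k + 2 + i
      · rw [if_pos h2.symm, if_neg h1, if_pos h2]
        rw [pvBotRow, ← h2]
      · rw [if_neg (by omega), if_neg (by omega), if_neg (by omega), if_neg h1, if_neg h2]

set_option maxHeartbeats 1000000 in
lemma pv_fold_get (trr brr blr : List (List Int)) (k : Nat) (nm0 : List (List Int))
    (hlen : nm0.length = 2 * k + 3) (j : Nat) (hj : j ≤ k) :
    (((List.range j).map (fun i : Nat => (i : Int))).foldl (pvStep trr brr blr (k : Int)) nm0).length = 2 * k + 3 ∧
      ∀ r : Nat, r < 2 * k + 3 →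
        (((List.range j).map (fun i : Nat => (i : Int))).foldl (pvStep trr brr blr (k : Int)) nm0).getD r [] =
          if 1 ≤ r ∧ r ≤ j then pvTopRow trr (k : Int) (r - 1) (nm0.getD r [])
          else if k + 2 ≤ r ∧ r < k + 2 + j then pvBotRow brr blr (k : Int) (r - (k + 2)) (nm0.getD r [])
          else nm0.getD r [] := by
  induction j with
  | zero =>
      refine ⟨by simpa using hlen, ?_⟩
      intro r hr
      rw [if_neg (by omega), if_neg (by omega)]
      simp
  | succ j ih =>
      obtain ⟨ihlen, ihget⟩ := ih (by omega)
      have hrange : (List.range (j + 1)).map (fun i : Nat => (i : Int)) =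
          (List.range j).map (fun i : Nat => (i : Int)) ++ [(j : Int)] := by
        rw [List.range_succ]; simp
      rw [hrange, List.foldl_append, List.foldl_cons, List.foldl_nil]
      set F := ((List.range j).map (fun i : Nat => (i : Int))).foldl (pvStep trr brr blr (k : Int)) nm0 with hF
      obtain ⟨slen, sget⟩ := pv_step_get trr brr blr k F j ihlen (by omega)
      refine ⟨slen, ?_⟩
      intro r hr
      rw [sget r hr, ihget r hr]
      split_ifs <;> first | omega | rfl | (congr 1 ; omega)

lemma pv_append3_getD (xs ys zs : List Int) (c : Nat) :
    (xs ++ ys ++ zs).getD c 0 =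
      if c < xs.length then xs.getD c 0
      else if c < xs.length + ys.length then ys.getD (c - xs.length) 0
      else zs.getD (c - xs.length - ys.length) 0 := by
  simp only [List.getD]
  by_cases h1 : c < xs.length
  · rw [List.getElem?_append_left (by simp; omega), List.getElem?_append_left h1]
    simp [h1]
  · by_cases h2 : c < xs.length + ys.length
    · rw [List.getElem?_append_left (by simp; omega), List.getElem?_append_right (by omega)]
      simp [h1, h2]
    · rw [List.getElem?_append_right (by simp; omega)]
      simp only [List.length_append]
      have : c - (xs.length + ys.length) = c - xs.length - ys.length := by omega
      rw [this]
      simp [h1, h2]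

lemma pv_ext_getD (xs ys : List Int) (hl : xs.length = ys.length)
    (h : ∀ c, c < xs.length → xs.getD c 0 = ys.getD c 0) : xs = ys := by
  apply List.ext_getElem hl
  intro i h1 h2
  have := h i h1
  rwa [List.getD_eq_getElem _ _ h1, List.getD_eq_getElem _ _ h2] at this

lemma pv_getD_take (xs : List Int) (n c : Nat) (h : c < n) :
    (xs.take n).getD c 0 = xs.getD c 0 := by
  by_cases hc : c < xs.length
  · rw [List.getD_eq_getElem _ _ (by simp; omega), List.getD_eq_getElem _ _ hc]
    simp [List.getElem_take]
  · rw [List.getD_eq_default _ _ (by simp; omega), List.getD_eq_default _ _ (by omega)]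

lemma pv_getD_drop (xs : List Int) (n c : Nat) :
    (xs.drop n).getD c 0 = xs.getD (n + c) 0 := by
  by_cases hc : n + c < xs.length
  · rw [List.getD_eq_getElem _ _ (by simp; omega), List.getD_eq_getElem _ _ hc]
    simp [List.getElem_drop]
  · rw [List.getD_eq_default _ _ (by simp; omega), List.getD_eq_default _ _ (by omega)]

lemma pv_get2_cast (matrix : List (List Int)) (x y : Nat) :
    pvGet2 matrix (x : Int) (y : Int) = pvEntry matrix x y := by
  simp [pvGet2, pvEntry, PySem.List.pyGetD_natCast]

lemma pv_sq_rowlen (k : Nat) (Q : List (List Int)) (h : pvSq k Q) (i : Nat) (hi : i < k) :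
    (Q.getD i []).length = k := by
  rw [List.getD_eq_getElem _ _ (by rw [h.1]; exact hi)]
  exact h.2 _ (List.getElem_mem _)

lemma pv_ext_getD2 (xs ys : List (List Int)) (hl : xs.length = ys.length)
    (h : ∀ c, c < xs.length → xs.getD c [] = ys.getD c []) : xs = ys := by
  apply List.ext_getElem hl
  intro i h1 h2
  have := h i h1
  rwa [List.getD_eq_getElem _ _ h1, List.getD_eq_getElem _ _ h2] at this

lemma pv_entry_congr (Q : List (List Int)) {a b a2 b2 : Nat} (ha : a = a2) (hb : b = b2) :
    pvEntry Q a b = pvEntry Q a2 b2 := by rw [ha, hb]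

lemma pv_range_cast (n : Nat) :
    PySem.List.pyRange 0 (n : Int) 1 = (List.range n).map (fun t : Nat => (t : Int)) := by
  rw [PySem.List.pyRange_one, show ((n : Int) - 0).toNat = n from by omega]
  simp

lemma pv_setcell_len (nm : List (List Int)) (r c : Int) (v : Int) :
    (pvSetCell nm r c v).length = nm.length := by
  simp [pvSetCell]

lemma pv_setcell_rowlen (nm : List (List Int)) (p q : Nat) (v : Int) (r : Nat) :
    ((pvSetCell nm (p : Int) (q : Int) v).getD r []).length = (nm.getD r []).length := by
  show ((nm.set ((p : Int)).toNat ((nm.getD ((p : Int)).toNat []).set ((q : Int)).toNat v)).getD r []).length = _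
  rw [Int.toNat_natCast, Int.toNat_natCast, pv_getD_set]
  by_cases h : p = r ∧ p < nm.length
  · rw [if_pos h, List.length_set, h.1]
  · rw [if_neg h]

lemma pv_setcell_entry (nm : List (List Int)) (p q : Nat) (v : Int) (hp : p < nm.length) (r c : Nat) :
    pvEntry (pvSetCell nm (p : Int) (q : Int) v) r c =
      if p = r ∧ q = c ∧ q < (nm.getD p []).length then v else pvEntry nm r c := by
  unfold pvEntry
  show ((nm.set ((p : Int)).toNat ((nm.getD ((p : Int)).toNat []).set ((q : Int)).toNat v)).getD r []).getD c 0 = _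
  rw [Int.toNat_natCast, Int.toNat_natCast, pv_getD_set]
  by_cases h1 : p = r
  · subst h1
    rw [if_pos ⟨rfl, hp⟩, pv_getD_set]
    by_cases h2 : q = c ∧ q < (nm.getD p []).length
    · rw [if_pos h2, if_pos ⟨rfl, h2.1, h2.2⟩]
    · rw [if_neg h2, if_neg (by tauto)]
  · rw [if_neg (by tauto), if_neg (by tauto)]

set_option maxHeartbeats 2000000 in
lemma pv_cellfold (matrix : List (List Int)) (k i : Nat) (hik : i < k)
    (nm : List (List Int)) (hlen : nm.length = 2 * k + 3)
    (hrows : ∀ r : Nat, r < 2 * k + 3 → (nm.getD r []).length = 2 * k + 3)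
    (j : Nat) (hj : j ≤ k) :
    (((List.range j).map (fun t : Nat => (t : Int))).foldl (pvCellStep matrix (k : Int) (i : Int)) nm).length = 2 * k + 3 ∧
    (∀ r : Nat, r < 2 * k + 3 →
      ((((List.range j).map (fun t : Nat => (t : Int))).foldl (pvCellStep matrix (k : Int) (i : Int)) nm).getD r []).length = 2 * k + 3) ∧
    ∀ r c : Nat, r < 2 * k + 3 → c < 2 * k + 3 →
      pvEntry (((List.range j).map (fun t : Nat => (t : Int))).foldl (pvCellStep matrix (k : Int) (i : Int)) nm) r c =
        if r = 1 + i ∧ k + 2 ≤ c ∧ c < k + 2 + j then pvEntry matrix (2 * k + 2 - c) (k + 2 + i)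
        else if r = k + 2 + i ∧ k + 2 ≤ c ∧ c < k + 2 + j then pvEntry matrix (2 * k + 1 - i) (3 * k + 3 - c)
        else if r = k + 2 + i ∧ 1 ≤ c ∧ c < 1 + j then pvEntry matrix (k + 1 + c) (k - i)
        else pvEntry nm r c := by
  induction j with
  | zero =>
      refine ⟨by simpa using hlen, by simpa using hrows, ?_⟩
      intro r c hr hc
      rw [if_neg (by omega), if_neg (by omega), if_neg (by omega)]
      rfl
  | succ j ih =>
      obtain ⟨Glen, Growlen, Gent⟩ := ih (by omega)
      have hrange : (List.range (j + 1)).map (fun t : Nat => (t : Int)) =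
          (List.range j).map (fun t : Nat => (t : Int)) ++ [(j : Int)] := by
        rw [List.range_succ]; simp
      rw [hrange, List.foldl_append, List.foldl_cons, List.foldl_nil]
      set G := ((List.range j).map (fun t : Nat => (t : Int))).foldl (pvCellStep matrix (k : Int) (i : Int)) nm with hG
      have hstep : pvCellStep matrix (k : Int) (i : Int) G (j : Int) =
          pvSetCell (pvSetCell (pvSetCell G ((1 + i : Nat) : Int) ((k + 2 + j : Nat) : Int)
              (pvEntry matrix (k - j) (k + 2 + i)))
            ((k + 2 + i : Nat) : Int) ((k + 2 + j : Nat) : Int)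
              (pvEntry matrix (2 * k + 1 - i) (2 * k + 1 - j)))
          ((k + 2 + i : Nat) : Int) ((1 + j : Nat) : Int)
              (pvEntry matrix (k + 2 + j) (k - i)) := by
        unfold pvCellStep
        rw [show (1 : Int) + (i : Int) = ((1 + i : Nat) : Int) from by omega,
            show (k : Int) + 2 + (j : Int) = ((k + 2 + j : Nat) : Int) from by omega,
            show (k : Int) + 2 + (i : Int) = ((k + 2 + i : Nat) : Int) from by omega,
            show (1 : Int) + (j : Int) = ((1 + j : Nat) : Int) from by omega,
            show (k : Int) - (j : Int) = ((k - j : Nat) : Int) from by omega,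
            show 2 * (k : Int) + 1 - (i : Int) = ((2 * k + 1 - i : Nat) : Int) from by omega,
            show 2 * (k : Int) + 1 - (j : Int) = ((2 * k + 1 - j : Nat) : Int) from by omega,
            show (k : Int) - (i : Int) = ((k - i : Nat) : Int) from by omega,
            pv_get2_cast, pv_get2_cast, pv_get2_cast]
      rw [hstep]
      set G1 := pvSetCell G ((1 + i : Nat) : Int) ((k + 2 + j : Nat) : Int)
        (pvEntry matrix (k - j) (k + 2 + i)) with hG1
      set G2 := pvSetCell G1 ((k + 2 + i : Nat) : Int) ((k + 2 + j : Nat) : Int)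
        (pvEntry matrix (2 * k + 1 - i) (2 * k + 1 - j)) with hG2
      have hG1len : G1.length = 2 * k + 3 := by rw [hG1, pv_setcell_len, Glen]
      have hG2len : G2.length = 2 * k + 3 := by rw [hG2, pv_setcell_len, hG1len]
      have hG1row : ∀ r : Nat, r < 2 * k + 3 → (G1.getD r []).length = 2 * k + 3 := by
        intro r hr; rw [hG1, pv_setcell_rowlen]; exact Growlen r hr
      have hG2row : ∀ r : Nat, r < 2 * k + 3 → (G2.getD r []).length = 2 * k + 3 := by
        intro r hr; rw [hG2, pv_setcell_rowlen]; exact hG1row r hr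
      refine ⟨by rw [pv_setcell_len, hG2len], ?_, ?_⟩
      · intro r hr
        rw [pv_setcell_rowlen]; exact hG2row r hr
      · intro r c hr hc
        rw [pv_setcell_entry G2 (k + 2 + i) (1 + j) _ (by rw [hG2len]; omega) r c,
            hG2row (k + 2 + i) (by omega)]
        rw [hG2, pv_setcell_entry G1 (k + 2 + i) (k + 2 + j) _ (by rw [hG1len]; omega) r c,
            hG1row (k + 2 + i) (by omega)]
        rw [hG1, pv_setcell_entry G (1 + i) (k + 2 + j) _ (by rw [Glen]; omega) r c,
            Growlen (1 + i) (by omega)]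
        rw [Gent r c hr hc]
        split_ifs <;> first | omega | rfl | (exact pv_entry_congr matrix (by omega) (by omega))

set_option maxHeartbeats 2000000 in
lemma pv_outerfold (matrix : List (List Int)) (k : Nat)
    (nm0 : List (List Int)) (hlen : nm0.length = 2 * k + 3)
    (hrows : ∀ r : Nat, r < 2 * k + 3 → (nm0.getD r []).length = 2 * k + 3)
    (m : Nat) (hmk : m ≤ k) :
    (((List.range m).map (fun t : Nat => (t : Int))).foldl (pvQuadStep matrix (k : Int)) nm0).length = 2 * k + 3 ∧
    (∀ r : Nat, r < 2 * k + 3 →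
      ((((List.range m).map (fun t : Nat => (t : Int))).foldl (pvQuadStep matrix (k : Int)) nm0).getD r []).length = 2 * k + 3) ∧
    ∀ r c : Nat, r < 2 * k + 3 → c < 2 * k + 3 →
      pvEntry (((List.range m).map (fun t : Nat => (t : Int))).foldl (pvQuadStep matrix (k : Int)) nm0) r c =
        if 1 ≤ r ∧ r ≤ m ∧ k + 2 ≤ c ∧ c ≤ 2 * k + 1 then pvEntry matrix (2 * k + 2 - c) (k + 1 + r)
        else if k + 2 ≤ r ∧ r < k + 2 + m ∧ k + 2 ≤ c ∧ c ≤ 2 * k + 1 then pvEntry matrix (3 * k + 3 - r) (3 * k + 3 - c)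
        else if k + 2 ≤ r ∧ r < k + 2 + m ∧ 1 ≤ c ∧ c ≤ k then pvEntry matrix (k + 1 + c) (2 * k + 2 - r)
        else pvEntry nm0 r c := by
  induction m with
  | zero =>
      refine ⟨by simpa using hlen, by simpa using hrows, ?_⟩
      intro r c hr hc
      rw [if_neg (by omega), if_neg (by omega), if_neg (by omega)]
      rfl
  | succ m ih =>
      obtain ⟨Flen, Frow, Fent⟩ := ih (by omega)
      have hrange : (List.range (m + 1)).map (fun t : Nat => (t : Int)) =
          (List.range m).map (fun t : Nat => (t : Int)) ++ [(m : Int)] := by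
        rw [List.range_succ]; simp
      rw [hrange, List.foldl_append, List.foldl_cons, List.foldl_nil]
      set F := ((List.range m).map (fun t : Nat => (t : Int))).foldl (pvQuadStep matrix (k : Int)) nm0 with hF
      have hq : pvQuadStep matrix (k : Int) F ((m : Nat) : Int) =
          ((List.range k).map (fun t : Nat => (t : Int))).foldl (pvCellStep matrix (k : Int) ((m : Nat) : Int)) F := by
        unfold pvQuadStep
        rw [pv_range_cast]
      rw [hq]
      obtain ⟨Clen, Crow, Cent⟩ := pv_cellfold matrix k m (by omega) F Flen Frow k le_rfl
      refine ⟨Clen, Crow, ?_⟩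
      intro r c hr hc
      rw [Cent r c hr hc, Fent r c hr hc]
      split_ifs <;> first | omega | rfl | (exact pv_entry_congr matrix (by omega) (by omega))

set_option maxHeartbeats 2000000 in
theorem pv_main : ∀ (matrix : List (List Int)) (l : Int), Pre_transform_matrix_with_fixed_edges matrix l → transform_matrix_with_fixed_edges matrix l = transform_matrix_with_fixed_edges_alt matrix l := by
  intro matrix l hpre
  by_cases hneg : l < 1
  · -- the loops never run: both sides are the row-wise copy
    simp only [transform_matrix_with_fixed_edges, transform_matrix_with_fixed_edges_alt]
    have hempty : PySem.List.pyRange 0 l 1 = [] := by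
      rw [PySem.List.pyRange_one, show (l - 0).toNat = 0 from by omega]
      simp
    rw [hempty]
    rfl
  · obtain ⟨hl, hmlen0, hrows0⟩ := hpre.resolve_left hneg
    obtain ⟨k, rfl⟩ : ∃ k : Nat, l = (k : Int) := ⟨l.toNat, (Int.toNat_of_nonneg hl).symm⟩
    have hm : matrix.length = 2 * k + 3 := by omega
    have hrow : ∀ row ∈ matrix, row.length = 2 * k + 3 := by
      intro row hr; have := hrows0 row hr; omega
    have hrowD : ∀ r : Nat, r < 2 * k + 3 → (matrix.getD r []).length = 2 * k + 3 := by
      intro r hr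
      rw [List.getD_eq_getElem _ _ (by omega)]
      exact hrow _ (List.getElem_mem _)
    have hNM : matrix.map (fun row => PySem.List.slice row none none) = matrix := by
      simp [PySem.List.slice_none_none]
    -- quadrant entry characterisations
    obtain ⟨hTRsq, hTRent⟩ := pv_quad_spec k 1 (k + 2) 1 ((k : Int) + 1) ((k : Int) + 2)
      (2 * (k : Int) + 2) matrix hm hrow (by norm_num) (by push_cast; ring) (by push_cast; ring)
      (by push_cast; ring) (by omega) (by omega)
    obtain ⟨hBLsq, hBLent⟩ := pv_quad_spec k (k + 2) 1 ((k : Int) + 2) (2 * (k : Int) + 2) 1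
      ((k : Int) + 1) matrix hm hrow (by push_cast; ring) (by push_cast; ring) (by norm_num)
      (by push_cast; ring) (by omega) (by omega)
    obtain ⟨hBRsq, hBRent⟩ := pv_quad_spec k (k + 2) (k + 2) ((k : Int) + 2) (2 * (k : Int) + 2)
      ((k : Int) + 2) (2 * (k : Int) + 2) matrix hm hrow (by push_cast; ring) (by push_cast; ring)
      (by push_cast; ring) (by push_cast; ring) (by omega) (by omega)
    -- rotated quadrants
    have hTRRsq := pv_rot90_sq k _ hTRsq
    have hBRRsq : pvSq k (pvRot180 ((PySem.List.slice matrix (some ((k : Int) + 2)) (some (2 * (k : Int) + 2))).map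
        (fun row => PySem.List.slice row (some ((k : Int) + 2)) (some (2 * (k : Int) + 2))))) := by
      unfold pvRot180
      exact pv_rot90_sq k _ (pv_rot90_sq k _ hBRsq)
    have hBLRsq : pvSq k (pvRot270 ((PySem.List.slice matrix (some ((k : Int) + 2)) (some (2 * (k : Int) + 2))).map
        (fun row => PySem.List.slice row (some 1) (some ((k : Int) + 1))))) := by
      unfold pvRot270 pvRot180
      exact pv_rot90_sq k _ (pv_rot90_sq k _ (pv_rot90_sq k _ hBLsq))
    have hTRRent : ∀ i j : Nat, i < k → j < k →
        pvEntry (pvRot90 ((PySem.List.slice matrix (some 1) (some ((k : Int) + 1))).map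
          (fun row => PySem.List.slice row (some ((k : Int) + 2)) (some (2 * (k : Int) + 2))))) i j =
        pvEntry matrix (k - j) (k + 2 + i) := by
      intro i j hi hj
      rw [pv_rot90_entry k _ hTRsq i j hi hj, hTRent (k - 1 - j) i (by omega) hi]
      have e : 1 + (k - 1 - j) = k - j := by omega
      rw [e]
    have hBRRent : ∀ i j : Nat, i < k → j < k →
        pvEntry (pvRot180 ((PySem.List.slice matrix (some ((k : Int) + 2)) (some (2 * (k : Int) + 2))).map
          (fun row => PySem.List.slice row (some ((k : Int) + 2)) (some (2 * (k : Int) + 2))))) i j =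
        pvEntry matrix (2 * k + 1 - i) (2 * k + 1 - j) := by
      intro i j hi hj
      rw [pv_rot180_entry k _ hBRsq i j hi hj, hBRent (k - 1 - i) (k - 1 - j) (by omega) (by omega)]
      have e1 : k + 2 + (k - 1 - i) = 2 * k + 1 - i := by omega
      have e2 : k + 2 + (k - 1 - j) = 2 * k + 1 - j := by omega
      rw [e1, e2]
    have hBLRent : ∀ i j : Nat, i < k → j < k →
        pvEntry (pvRot270 ((PySem.List.slice matrix (some ((k : Int) + 2)) (some (2 * (k : Int) + 2))).map
          (fun row => PySem.List.slice row (some 1) (some ((k : Int) + 1))))) i j =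
        pvEntry matrix (k + 2 + j) (k - i) := by
      intro i j hi hj
      rw [pv_rot270_entry k _ hBLsq i j hi hj, hBLent j (k - 1 - i) hj (by omega)]
      have e : 1 + (k - 1 - i) = k - i := by omega
      rw [e]
    -- unfold both ports
    simp only [transform_matrix_with_fixed_edges, transform_matrix_with_fixed_edges_alt]
    rw [hNM, pv_range_cast k]
    obtain ⟨hAlen, hAget⟩ := pv_fold_get _ _ _ k matrix hm k le_rfl
    obtain ⟨hBlen, hBrow, hBent⟩ := pv_outerfold matrix k matrix hm hrowD k le_rfl
    apply pv_ext_getD2 _ _ (by rw [hAlen, hBlen])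
    intro r hr0
    have hr : r < 2 * k + 3 := by rwa [hAlen] at hr0
    rw [hAget r hr]
    -- helper facts for slices appearing in pvTopRow / pvBotRow
    have hto : ∀ row : List Int, PySem.List.slice row none (some ((k : Int) + 2)) = row.take (k + 2) := by
      intro row
      rw [PySem.List.slice_to row (by omega), show ((k : Int) + 2).toNat = k + 2 from by omega]
    have hto1 : ∀ row : List Int, PySem.List.slice row none (some (1 : Int)) = row.take 1 := by
      intro row
      rw [PySem.List.slice_to row (by omega), show ((1 : Int)).toNat = 1 from by omega]
    have hfrom : ∀ row : List Int, PySem.List.slice row (some (2 * (k : Int) + 2)) none = row.drop (2 * k + 2) := by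
      intro row
      rw [PySem.List.slice_from row (by omega), show (2 * (k : Int) + 2).toNat = 2 * k + 2 from by omega]
    have hfrom1 : ∀ row : List Int, PySem.List.slice row (some ((k : Int) + 1)) none = row.drop (k + 1) := by
      intro row
      rw [PySem.List.slice_from row (by omega), show ((k : Int) + 1).toNat = k + 1 from by omega]
    by_cases hr1 : 1 ≤ r ∧ r ≤ k
    · -- top region
      rw [if_pos hr1]
      simp only [pvTopRow]
      rw [hto, hfrom, PySem.List.pyGetD_natCast]
      have hrl := hrowD r hr
      have htrl : ((pvRot90 ((PySem.List.slice matrix (some 1) (some ((k : Int) + 1))).map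
          (fun row => PySem.List.slice row (some ((k : Int) + 2)) (some (2 * (k : Int) + 2))))).getD (r - 1) []).length = k :=
        pv_sq_rowlen k _ hTRRsq (r - 1) (by omega)
      have hBr := hBrow r hr
      apply pv_ext_getD
      · simp only [List.length_append, List.length_take, List.length_drop, hrl, htrl, hBr]
        omega
      · intro c hc0
        have hc : c < 2 * k + 3 := by
          simp only [List.length_append, List.length_take, List.length_drop, hrl, htrl] at hc0
          omega
        have hB := hBent r c hr hc
        rw [pv_append3_getD]
        simp only [List.length_take, hrl, htrl]
        rw [show min (k + 2) (2 * k + 3) = k + 2 from by omega]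
        by_cases hc1 : c < k + 2
        · rw [if_pos hc1, pv_getD_take _ _ _ hc1]
          rw [if_neg (by omega), if_neg (by omega), if_neg (by omega)] at hB
          exact hB.symm
        · by_cases hc2 : c < k + 2 + k
          · rw [if_neg hc1, if_pos hc2]
            have hE : ((pvRot90 ((PySem.List.slice matrix (some 1) (some ((k : Int) + 1))).map
                (fun row => PySem.List.slice row (some ((k : Int) + 2)) (some (2 * (k : Int) + 2))))).getD (r - 1) []).getD (c - (k + 2)) 0 =
                pvEntry matrix (k - (c - (k + 2))) (k + 2 + (r - 1)) :=
              hTRRent (r - 1) (c - (k + 2)) (by omega) (by omega)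
            rw [hE]
            rw [if_pos (by omega)] at hB
            exact (pv_entry_congr matrix (show k - (c - (k + 2)) = 2 * k + 2 - c from by omega)
              (show k + 2 + (r - 1) = k + 1 + r from by omega)).trans hB.symm
          · rw [if_neg hc1, if_neg hc2, pv_getD_drop,
                show 2 * k + 2 + (c - (k + 2) - k) = c from by omega]
            rw [if_neg (by omega), if_neg (by omega), if_neg (by omega)] at hB
            exact hB.symm
    · by_cases hr2 : k + 2 ≤ r ∧ r < k + 2 + k
      · -- bottom region
        rw [if_neg hr1, if_pos hr2]
        simp only [pvBotRow]
        rw [hto, hto1, hfrom, hfrom1, PySem.List.pyGetD_natCast, PySem.List.pyGetD_natCast]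
        have hrl := hrowD r hr
        have hbrl : ((pvRot180 ((PySem.List.slice matrix (some ((k : Int) + 2)) (some (2 * (k : Int) + 2))).map
            (fun row => PySem.List.slice row (some ((k : Int) + 2)) (some (2 * (k : Int) + 2))))).getD (r - (k + 2)) []).length = k :=
          pv_sq_rowlen k _ hBRRsq (r - (k + 2)) (by omega)
        have hbll : ((pvRot270 ((PySem.List.slice matrix (some ((k : Int) + 2)) (some (2 * (k : Int) + 2))).map
            (fun row => PySem.List.slice row (some 1) (some ((k : Int) + 1))))).getD (r - (k + 2)) []).length = k :=
          pv_sq_rowlen k _ hBLRsq (r - (k + 2)) (by omega)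
        have hrow1 : ∀ c : Nat, c < 2 * k + 3 →
            ((matrix.getD r []).take (k + 2) ++
              (pvRot180 ((PySem.List.slice matrix (some ((k : Int) + 2)) (some (2 * (k : Int) + 2))).map
                (fun row => PySem.List.slice row (some ((k : Int) + 2)) (some (2 * (k : Int) + 2))))).getD (r - (k + 2)) [] ++
              (matrix.getD r []).drop (2 * k + 2)).getD c 0 =
            if c < k + 2 then (matrix.getD r []).getD c 0
            else if c < 2 * k + 2 then pvEntry matrix (3 * k + 3 - r) (3 * k + 3 - c)
            else (matrix.getD r []).getD c 0 := by
          intro c hcc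
          rw [pv_append3_getD]
          simp only [List.length_take, hrl, hbrl]
          rw [show min (k + 2) (2 * k + 3) = k + 2 from by omega]
          by_cases hc1 : c < k + 2
          · rw [if_pos hc1, if_pos hc1, pv_getD_take _ _ _ hc1]
          · by_cases hc2 : c < k + 2 + k
            · rw [if_neg hc1, if_pos hc2, if_neg hc1, if_pos (by omega)]
              have hE := hBRRent (r - (k + 2)) (c - (k + 2)) (by omega) (by omega)
              have e1 : 2 * k + 1 - (r - (k + 2)) = 3 * k + 3 - r := by omega
              have e2 : 2 * k + 1 - (c - (k + 2)) = 3 * k + 3 - c := by omega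
              rw [e1, e2] at hE
              exact hE
            · rw [if_neg hc1, if_neg hc2, if_neg hc1, if_neg (by omega), pv_getD_drop]
              have e : 2 * k + 2 + (c - (k + 2) - k) = c := by omega
              rw [e]
        have hrow1len : ((matrix.getD r []).take (k + 2) ++
              (pvRot180 ((PySem.List.slice matrix (some ((k : Int) + 2)) (some (2 * (k : Int) + 2))).map
                (fun row => PySem.List.slice row (some ((k : Int) + 2)) (some (2 * (k : Int) + 2))))).getD (r - (k + 2)) [] ++
              (matrix.getD r []).drop (2 * k + 2)).length = 2 * k + 3 := by
          simp only [List.length_append, List.length_take, List.length_drop, hrl, hbrl]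
          omega
        have hBr := hBrow r hr
        apply pv_ext_getD
        · simp only [List.length_append, List.length_take, List.length_drop, hrow1len, hbll, hBr]
          omega
        · intro c hc0
          have hc : c < 2 * k + 3 := by
            simp only [List.length_append, List.length_take, List.length_drop, hrow1len, hbll] at hc0
            omega
          have hB := hBent r c hr hc
          rw [pv_append3_getD]
          simp only [List.length_take, hrow1len, hbll]
          rw [show min 1 (2 * k + 3) = 1 from by omega]
          by_cases hc1 : c < 1
          · rw [if_pos hc1, pv_getD_take _ _ _ hc1, hrow1 c hc, if_pos (by omega)]
            rw [if_neg (by omega), if_neg (by omega), if_neg (by omega)] at hB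
            exact hB.symm
          · by_cases hc2 : c < 1 + k
            · rw [if_neg hc1, if_pos hc2]
              have hE := hBLRent (r - (k + 2)) (c - 1) (by omega) (by omega)
              rw [if_neg (by omega), if_neg (by omega), if_pos (by omega)] at hB
              exact (hE.trans (pv_entry_congr matrix
                (show k + 2 + (c - 1) = k + 1 + c from by omega)
                (show k - (r - (k + 2)) = 2 * k + 2 - r from by omega))).trans hB.symm
            · rw [if_neg hc1, if_neg hc2, pv_getD_drop,
                  show k + 1 + (c - 1 - k) = c from by omega, hrow1 c hc]
              by_cases hc3 : c < k + 2
              · rw [if_pos hc3]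
                rw [if_neg (by omega), if_neg (by omega), if_neg (by omega)] at hB
                exact hB.symm
              · by_cases hc4 : c < 2 * k + 2
                · rw [if_neg hc3, if_pos hc4]
                  rw [if_neg (by omega), if_pos (by omega)] at hB
                  exact hB.symm
                · rw [if_neg hc3, if_neg hc4]
                  rw [if_neg (by omega), if_neg (by omega), if_neg (by omega)] at hB
                  exact hB.symm
      · -- untouched rows
        rw [if_neg hr1, if_neg hr2]
        have hrl := hrowD r hr
        have hBr := hBrow r hr
        apply pv_ext_getD
        · rw [hrl, hBr]
        · intro c hc0
          have hc : c < 2 * k + 3 := by rwa [hrl] at hc0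
          have hB := hBent r c hr hc
          rw [if_neg (by omega), if_neg (by omega), if_neg (by omega)] at hB
          exact hB.symm

-- ===== VERDICT (by name: the statement is the Claim_ definition above) =====
theorem transform_matrix_with_fixed_edges_spec : Claim_equal_transform_matrix_with_fixed_edges := by
  intro matrix l _ hpre
  exact pv_main matrix l hpre
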